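-- pv_equiv track=rewrite | github.com/Adixqa/PerfectionBot | scripts/yt.py | _encode_marker
-- ===== SOURCE A (Python) =====
-- _MARKER_START = '\u2063'
--
-- _ZW_0 = '\u200b'
--
-- _ZW_1 = '\u200c'
--
-- def _encode_marker(t: str) -> str:
--     if not t:
--         return ""
--     try:
--         b = t.encode('utf-8')
--     except Exception:
--         b = str(t).encode('utf-8')
--     bits = ''.join(f'{byte:08b}' for byte in b)
--     zw = ''.join(_ZW_0 if bit == '0' else _ZW_1 for bit in bits)
--     return _MARKER_START + zw
-- ===== SOURCE B (Python) =====
-- _MARKER_START = '\u2063'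
--
-- _ZW_0 = '\u200b'
--
-- _ZW_1 = '\u200c'
--
-- # 256-entry table: table[v] is the 8-char zero-width encoding of byte value v.
-- _TABLE = [
--     ''.join(_ZW_1 if (v >> (7 - i)) & 1 else _ZW_0 for i in range(8))
--     for v in range(256)
-- ]
--
-- def _encode_marker(t: str) -> str:
--     if not t:
--         return ""
--     try:
--         b = t.encode('utf-8')
--     except Exception:
--         b = str(t).encode('utf-8')
--     return _MARKER_START + ''.join(_TABLE[byte] for byte in b)
-- ===== Notes on version B (the rewrite author's own statement) =====
-- stated objective: faster
-- what changed: B precomputes a 256-entry table of 8-char zero-width encodings at module load and emits one table lookup per byte, removing A's per-byte bit-string formatting and the separate per-bit translation pass over the whole bit string.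
import Mathlib
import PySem

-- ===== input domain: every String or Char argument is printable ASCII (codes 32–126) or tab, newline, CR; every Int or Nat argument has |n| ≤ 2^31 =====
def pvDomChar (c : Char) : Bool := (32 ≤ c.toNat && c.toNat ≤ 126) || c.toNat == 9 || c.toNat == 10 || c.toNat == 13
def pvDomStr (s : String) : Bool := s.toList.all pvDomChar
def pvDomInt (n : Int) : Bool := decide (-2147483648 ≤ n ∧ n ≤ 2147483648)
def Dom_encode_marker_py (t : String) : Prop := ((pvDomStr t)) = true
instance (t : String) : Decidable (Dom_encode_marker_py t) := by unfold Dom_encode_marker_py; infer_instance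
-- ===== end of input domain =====

-- B replaces A's per-byte bit-string formatting + second per-bit pass by one lookup per byte
-- in a precomputed 256-entry table (objective: faster by a constant factor).
-- On Dom (ASCII), t.encode('utf-8') never raises and yields one byte (= code point) per char;
-- the ports encode it as t.toList.map Char.toNat, exact on that domain.

-- ===== PORT A =====
-- f'{byte:08b}' for byte < 256: the 8 bit characters, most significant first
def pvByteBits (b : Nat) : List Char :=
  (List.range 8).map (fun i => if (b >>> (7 - i)) % 2 == 1 then '1' else '0')

def encode_marker_py (t : String) : String :=
  if t.toList.isEmpty then ""
  else
    let b := t.toList.map Char.toNat          -- t.encode('utf-8'); exact on Dom's ASCII strings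
    let bits := b.flatMap pvByteBits          -- ''.join(f'{byte:08b}' for byte in b)
    let zw := bits.map (fun bit => if bit == '0' then '\u200b' else '\u200c')
    String.ofList ('\u2063' :: zw)

-- ===== PORT B =====
-- the module-level 256-entry table
def pvZwTable : List (List Char) :=
  (List.range 256).map (fun v =>
    (List.range 8).map (fun i => if (v >>> (7 - i)) &&& 1 == 1 then '\u200c' else '\u200b'))

def encode_marker_py_alt (t : String) : String :=
  if t.toList.isEmpty then ""
  else
    let b := t.toList.map Char.toNat          -- t.encode('utf-8'); exact on Dom's ASCII strings
    String.ofList ('\u2063' :: b.flatMap (fun byte => pvZwTable.getD byte []))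

-- ===== PRECONDITION & SPEC =====
def Spec_encode_marker_py (t : String) (out : String) : Prop := out = encode_marker_py_alt t
instance (t : String) (out : String) : Decidable (Spec_encode_marker_py t out) := by unfold Spec_encode_marker_py; infer_instance

-- ===== CLAIM (what is proved, stated in full; the proofs are below) =====
def Claim_equal_encode_marker_py : Prop := ∀ (t : String), Dom_encode_marker_py t → Spec_encode_marker_py t (encode_marker_py t)

-- ===== LEMMAS AND PROOFS =====

-- one byte: B's table entry is exactly A's bit string translated bit-by-bit
lemma pvEntry_eq (v : Nat) (hv : v < 256) :
    pvZwTable.getD v [] =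
      (pvByteBits v).map (fun bit => if bit == '0' then '\u200b' else '\u200c') := by
  rw [pvZwTable, PySem.List.getD_map_range _ 256 v [] hv, pvByteBits, List.map_map]
  refine List.map_congr_left (fun i _ => ?_)
  simp only [Function.comp]
  rcases Nat.mod_two_eq_zero_or_one (v >>> (7 - i)) with h | h <;>
    simp [Nat.and_one_is_mod, h]

lemma pvBody_eq (cs : List Char) (hcs : cs.all pvDomChar = true) :
    (cs.map Char.toNat |>.flatMap pvByteBits).map
        (fun bit => if bit == '0' then '\u200b' else '\u200c') =
      (cs.map Char.toNat |>.flatMap (fun byte => pvZwTable.getD byte [])) := by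
  induction cs with
  | nil => rfl
  | cons c cs ih =>
      simp only [List.all_cons, Bool.and_eq_true] at hcs
      have hc : c.toNat < 256 := by
        have := hcs.1
        simp only [pvDomChar, Bool.or_eq_true, Bool.and_eq_true, decide_eq_true_eq,
          beq_iff_eq] at this
        omega
      simp only [List.map_cons, List.flatMap_cons, List.map_append, ih hcs.2]
      rw [pvEntry_eq c.toNat hc]

-- ===== VERDICT (by name: the statement is the Claim_ definition above) =====
theorem encode_marker_py_spec : Claim_equal_encode_marker_py := by
  intro t ht
  unfold Spec_encode_marker_py encode_marker_py encode_marker_py_alt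
  by_cases h : t.toList.isEmpty <;> simp only [h, if_true, if_false, Bool.false_eq_true]
  exact congrArg String.ofList (congrArg (List.cons _) (pvBody_eq t.toList ht))
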